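-- pv_equiv track=rewrite | github.com/powera/atacama | common/pinyin.py | apply_third_tone_sandhi
-- ===== SOURCE A (Python) =====
-- from typing import Dict, List, Optional, Tuple, Set
--
-- def apply_third_tone_sandhi(syllables: List[Tuple[str, int]]) -> List[Tuple[str, int]]:
--     """Apply tone sandhi rules for third tones."""
--     result = []
--     i = 0
--     while i < len(syllables):
--         if i + 1 < len(syllables) and syllables[i][1] == 3 and syllables[i + 1][1] == 3:
--             # Change first third tone to second tone
--             result.append((syllables[i][0], 2))
--             result.append(syllables[i + 1])
--             i += 2
--         else:
--             result.append(syllables[i])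
--             i += 1
--     return result
-- ===== SOURCE B (Python) =====
-- from typing import List, Tuple
--
-- def apply_third_tone_sandhi(syllables: List[Tuple[str, int]]) -> List[Tuple[str, int]]:
--     """Apply tone sandhi rules for third tones (run-grouping formulation)."""
--     out = []
--     i = 0
--     n = len(syllables)
--     while i < n:
--         if syllables[i][1] != 3:
--             out.append(syllables[i])
--             i += 1
--         else:
--             j = i
--             while j < n and syllables[j][1] == 3:
--                 j += 1
--             run = syllables[i:j]
--             L = j - i
--             # in a maximal run of third tones, the first element of each
--             # complete pair (even in-run offset with a successor) becomes tone 2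
--             out.extend((s, 2) if k % 2 == 0 and k + 1 < L else (s, t)
--                        for k, (s, t) in enumerate(run))
--             i = j
--     return out
-- ===== Notes on version B (the rewrite author's own statement) =====
-- stated objective: alternative
-- what changed: Replaces A's greedy pointer-advancing while loop (step 2 on a tone-3 pair, else step 1) with run-grouping: find each maximal run of consecutive third tones and emit it in one enumerate pass, changing to tone 2 exactly the even in-run offsets that start a complete pair.
import Mathlib
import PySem

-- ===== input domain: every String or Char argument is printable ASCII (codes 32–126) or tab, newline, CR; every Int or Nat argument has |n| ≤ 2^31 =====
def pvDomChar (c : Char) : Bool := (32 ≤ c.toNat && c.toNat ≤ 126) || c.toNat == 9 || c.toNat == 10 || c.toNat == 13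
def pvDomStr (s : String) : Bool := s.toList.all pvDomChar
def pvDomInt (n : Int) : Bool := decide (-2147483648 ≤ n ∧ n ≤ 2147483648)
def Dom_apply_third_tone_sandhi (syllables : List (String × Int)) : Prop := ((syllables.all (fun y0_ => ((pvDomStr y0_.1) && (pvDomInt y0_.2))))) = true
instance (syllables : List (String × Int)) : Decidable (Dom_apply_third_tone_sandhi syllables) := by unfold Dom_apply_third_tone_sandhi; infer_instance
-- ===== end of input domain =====

-- B replaces A's greedy pointer-advancing pair loop by run-grouping over maximal
-- tone-3 runs plus a parity rule inside each run (objective: alternative decomposition).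

-- ===== PORT A =====
-- A's while loop advances i by 2 when a tone-3 pair is found, else by 1:
-- structural recursion consuming the list the same way.
def apply_third_tone_sandhi (syllables : List (String × Int)) : List (String × Int) :=
  match syllables with
  | a :: b :: rest =>
    if a.2 == 3 && b.2 == 3 then
      (a.1, 2) :: b :: apply_third_tone_sandhi rest
    else
      a :: apply_third_tone_sandhi (b :: rest)
  | l => l

-- ===== PORT B =====
-- the per-run emission: mark the first element of each complete pair (even
-- in-run offset k with k+1 < L) as tone 2; ports Source B's enumerate comprehension
def pvMarkRun (L : Int) (run : List (String × Int)) : List (String × Int) :=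
  (PySem.List.enumerate run).map
    (fun p => if PySem.Int.mod p.1 2 == 0 && p.1 + 1 < L then (p.2.1, (2 : Int)) else p.2)

-- Source B's outer while loop: scan to the end of each maximal tone-3 run and emit it
def apply_third_tone_sandhi_alt (syllables : List (String × Int)) : List (String × Int) :=
  match syllables with
  | [] => []
  | x :: xs =>
    if x.2 == 3 then
      let run := (x :: xs).takeWhile (fun s => s.2 == 3)
      pvMarkRun run.length run ++
        apply_third_tone_sandhi_alt ((x :: xs).dropWhile (fun s => s.2 == 3))
    else
      x :: apply_third_tone_sandhi_alt xs
termination_by syllables.length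
decreasing_by
  · rename_i hx
    have h := List.length_dropWhile_le (fun s : String × Int => s.2 == 3) xs
    simp only [List.dropWhile, hx, List.length_cons]
    omega
  · simp

-- ===== PRECONDITION & SPEC =====
def Spec_apply_third_tone_sandhi (syllables : List (String × Int)) (out : List (String × Int)) : Prop := out = apply_third_tone_sandhi_alt syllables
instance (syllables : List (String × Int)) (out : List (String × Int)) : Decidable (Spec_apply_third_tone_sandhi syllables out) := by unfold Spec_apply_third_tone_sandhi; infer_instance

-- ===== CLAIM (what is proved, stated in full; the proofs are below) =====
def Claim_equal_apply_third_tone_sandhi : Prop := ∀ (syllables : List (String × Int)), Dom_apply_third_tone_sandhi syllables → Spec_apply_third_tone_sandhi syllables (apply_third_tone_sandhi syllables)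

-- ===== LEMMAS AND PROOFS =====

-- proof helper: greedy pair-marking of a run (characterises A on a pure tone-3 run)
def pvPairMark : List (String × Int) → List (String × Int)
  | [] => []
  | [a] => [a]
  | a :: b :: t => (a.1, 2) :: b :: pvPairMark t

theorem pairMark_A : ∀ (run rest : List (String × Int)),
    (∀ s ∈ run, s.2 = 3) → (∀ h, rest.head? = some h → h.2 ≠ 3) →
    apply_third_tone_sandhi (run ++ rest) = pvPairMark run ++ apply_third_tone_sandhi rest := by
  intro run
  induction run using pvPairMark.induct with
  | case1 =>
    intro rest _ _
    simp [pvPairMark]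
  | case2 a =>
    intro rest hall hrest
    have ha : a.2 = 3 := hall a (by simp)
    simp only [pvPairMark, List.cons_append, List.nil_append]
    match rest with
    | [] => simp [apply_third_tone_sandhi]
    | h :: r =>
      have hh : h.2 ≠ 3 := hrest h (by simp)
      simp [apply_third_tone_sandhi, hh]
  | case3 a b t ih =>
    intro rest hall hrest
    have ha : a.2 = 3 := hall a (by simp)
    have hb : b.2 = 3 := hall b (by simp)
    simp only [List.cons_append, apply_third_tone_sandhi, ha, hb, pvPairMark]
    simp [ih rest (fun s hs => hall s (by simp [hs])) hrest]

theorem markRun_eq_pairMark : ∀ (t : List (String × Int)) (j : Int), j % 2 = 0 →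
    (PySem.List.enumerate t j).map
      (fun p => if PySem.Int.mod p.1 2 == 0 && p.1 + 1 < j + t.length then (p.2.1, (2 : Int)) else p.2)
    = pvPairMark t := by
  intro t
  induction t using pvPairMark.induct with
  | case1 =>
    intro j _
    simp [pvPairMark]
  | case2 a =>
    intro j _
    have : ¬ (j + 1 < j + (([a] : List (String × Int)).length : Int)) := by simp
    simp [PySem.List.enumerate_cons, pvPairMark]
  | case3 a b tl ih =>
    intro j hmod
    have hL : j + (((a :: b :: tl).length : Nat) : Int) = j + 1 + 1 + (tl.length : Int) := by
      push_cast [List.length_cons]; ring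
    have h1 : j + 1 < j + 1 + 1 + (tl.length : Int) := by omega
    have hmod2 : (j + 1 + 1) % 2 = 0 := by omega
    simp only [PySem.List.enumerate_cons, List.map_cons, pvPairMark, hL]
    rw [ih (j + 1 + 1) hmod2]
    simp [h1]
    refine ⟨fun h => absurd h (by omega), fun h _ => absurd h (by omega)⟩

theorem A_skip (x : String × Int) (xs : List (String × Int)) (hx : x.2 ≠ 3) :
    apply_third_tone_sandhi (x :: xs) = x :: apply_third_tone_sandhi xs := by
  match xs with
  | [] => simp [apply_third_tone_sandhi]
  | y :: r => simp [apply_third_tone_sandhi, hx]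

theorem A_eq_B : ∀ (l : List (String × Int)),
    apply_third_tone_sandhi l = apply_third_tone_sandhi_alt l := by
  intro l
  induction l using apply_third_tone_sandhi_alt.induct with
  | case1 => simp [apply_third_tone_sandhi, apply_third_tone_sandhi_alt]
  | case2 x xs hx ih =>
    rw [apply_third_tone_sandhi_alt]
    simp only [hx]
    set run := (x :: xs).takeWhile (fun s : String × Int => s.2 == 3) with hrun
    set rest := (x :: xs).dropWhile (fun s : String × Int => s.2 == 3) with hrest
    have hsplit : run ++ rest = x :: xs := List.takeWhile_append_dropWhile
    have hall : ∀ s ∈ run, s.2 = 3 := by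
      intro s hs
      have := List.mem_takeWhile_imp (hrun ▸ hs)
      simpa using this
    have hhead : ∀ h, rest.head? = some h → h.2 ≠ 3 := by
      intro h hh
      have := List.head?_dropWhile_not (p := fun s : String × Int => s.2 == 3) (l := x :: xs)
      rw [← hrest, hh] at this
      simpa using this
    calc apply_third_tone_sandhi (x :: xs)
        = apply_third_tone_sandhi (run ++ rest) := by rw [hsplit]
      _ = pvPairMark run ++ apply_third_tone_sandhi rest := pairMark_A run rest hall hhead
      _ = pvMarkRun run.length run ++ apply_third_tone_sandhi_alt rest := by
          rw [ih]
          congr 1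
          unfold pvMarkRun
          rw [← markRun_eq_pairMark run 0 (by omega)]
          simp
  | case3 x xs hx ih =>
    have hx3 : x.2 ≠ 3 := by simpa using hx
    rw [A_skip x xs hx3, apply_third_tone_sandhi_alt]
    simp [hx, ih]

-- ===== VERDICT (by name: the statement is the Claim_ definition above) =====
theorem apply_third_tone_sandhi_spec : Claim_equal_apply_third_tone_sandhi := by
  intro l _
  unfold Spec_apply_third_tone_sandhi
  exact A_eq_B l
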